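-- pv_equiv track=rewrite | github.com/JolonB/Secret-Santa | secret_santa.py | slice_index_generator
-- ===== SOURCE A (Python) =====
-- def slice_index_generator(indices: tuple, step: int) -> list:
--     # indices == [(0,1,2,3),(0,1,3,2),(0,2,1,3),...,(3,2,1,0)], but we are only using one of them (i.e. (0,2,3,1))
--     # want to split into every possible sublist with a length of `step` or greater. So we should get [((0,2),(3,1))]. We will not get (0,2,3,1).
--     # if we had 5 values (0,1,2,3,4), then we should get [((0,1),(2,3,4)),((0,1,2),(3,4))]
--     result = []
--     for i in range(step, len(indices) + 1 - step):
--         start = indices[:i]  # type == tuple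
--         end = indices[i:]  # type == tuple
--         for sl_ind in slice_index_generator(end, step):  # sl_ind: type == tuple(tuple)
--             result.append((start, *sl_ind))
--         result.append((start, end))
--     return result  # list(tuple(tuple))
-- ===== SOURCE B (Python) =====
-- def slice_index_generator(indices: tuple, step: int) -> list:
--     # DP over suffix lengths: memo[k] holds every split of the suffix of length k,
--     # so the splits of each suffix are computed exactly once.
--     n = len(indices)
--     memo = [[]]
--     for k in range(1, n + 1):
--         res = []
--         base = n - k
--         for i in range(step, k + 1 - step):
--             start = indices[base:base + i]
--             end = indices[base + i:]
--             for sl in memo[k - i]: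
--                 res.append((start,) + sl)
--             res.append((start, end))
--         memo.append(res)
--     return memo[n]
-- ===== Notes on version B (the rewrite author's own statement) =====
-- stated objective: alternative
-- what changed: replaced A's naive recursion (which recomputes the split list of the same suffix once per prefix composition) by a bottom-up DP table memo[k] = splits of the suffix of length k, computed once per suffix
import Mathlib
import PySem

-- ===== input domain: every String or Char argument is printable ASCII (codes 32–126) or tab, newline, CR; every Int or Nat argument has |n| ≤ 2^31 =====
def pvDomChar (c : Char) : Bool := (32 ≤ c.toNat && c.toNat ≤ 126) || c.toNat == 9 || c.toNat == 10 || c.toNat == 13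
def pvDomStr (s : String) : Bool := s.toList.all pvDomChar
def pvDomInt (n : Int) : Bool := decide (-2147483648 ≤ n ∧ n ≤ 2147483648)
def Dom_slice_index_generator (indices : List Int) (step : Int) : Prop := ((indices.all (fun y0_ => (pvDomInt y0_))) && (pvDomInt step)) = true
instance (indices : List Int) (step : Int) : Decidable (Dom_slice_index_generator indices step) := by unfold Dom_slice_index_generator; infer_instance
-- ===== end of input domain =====

-- B replaces A's naive recursion by a bottom-up DP over suffix lengths (each
-- suffix's split list is computed once, instead of once per prefix composition);
-- same exact output on step >= 1 (A recurses forever when step <= 0).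

-- ===== PORT A =====
-- A is recursive; fuel = indices.length + 1 bounds the recursion depth (each
-- recursive call is on a strictly shorter suffix when step ≥ 1, i.e. on Pre_).
def pySliceA : Nat → List Int → Int → List (List (List Int))
  | 0, _, _ => []
  | fuel+1, indices, step =>
    (PySem.List.pyRange step ((indices.length : Int) + 1 - step) 1).foldl
      (fun result i =>
        let start := PySem.List.slice indices none (some i)        -- indices[:i]
        let endl  := PySem.List.slice indices (some i) none        -- indices[i:]
        ((pySliceA fuel endl step).foldl (fun r sl => r ++ [start :: sl]) result)
          ++ [[start, endl]])
      []

def slice_index_generator (indices : List Int) (step : Int) : List (List (List Int)) :=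
  pySliceA (indices.length + 1) indices step

-- ===== PORT B =====
def slice_index_generator_alt (indices : List Int) (step : Int) : List (List (List Int)) :=
  let n := indices.length
  let memo := (PySem.List.pyRange 1 ((n : Int) + 1) 1).foldl
    (fun memo k =>
      let base := (n : Int) - k
      let res := (PySem.List.pyRange step (k + 1 - step) 1).foldl
        (fun res i =>
          let start := PySem.List.slice indices (some base) (some (base + i))  -- indices[base:base+i]
          let endl  := PySem.List.slice indices (some (base + i)) none         -- indices[base+i:]
          ((memo.getD (k - i).toNat []).foldl (fun r sl => r ++ [start :: sl]) res)
            ++ [[start, endl]])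
        ([] : List (List (List Int)))
      memo ++ [res])
    [([] : List (List (List Int)))]
  memo.getD n []

-- ===== PRECONDITION & SPEC =====
-- Pre_ excludes step ≤ 0, where A never terminates (infinite recursion → RecursionError).
def Pre_slice_index_generator (indices : List Int) (step : Int) : Prop := 1 ≤ step
instance (indices : List Int) (step : Int) : Decidable (Pre_slice_index_generator indices step) := by unfold Pre_slice_index_generator; infer_instance
def pvWitness_slice_index_generator : List Int × Int := ([0, 1, 2, 3], 2)

def Spec_slice_index_generator (indices : List Int) (step : Int) (out : List (List (List Int))) : Prop := out = slice_index_generator_alt indices step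
instance (indices : List Int) (step : Int) (out : List (List (List Int))) : Decidable (Spec_slice_index_generator indices step out) := by unfold Spec_slice_index_generator; infer_instance

-- ===== CLAIM (what is proved, stated in full; the proofs are below) =====
def Claim_equal_slice_index_generator : Prop := ∀ (indices : List Int) (step : Int), Dom_slice_index_generator indices step → Pre_slice_index_generator indices step → Spec_slice_index_generator indices step (slice_index_generator indices step)

-- ===== LEMMAS AND PROOFS =====

-- canonical value: A with exactly enough fuel
def sliceG (xs : List Int) (step : Int) : List (List (List Int)) :=
  pySliceA (xs.length + 1) xs step

theorem sliceA_fuel (step : Int) (hs : 1 ≤ step) :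
    ∀ (m : Nat) (xs : List Int) (f : Nat), xs.length < f → xs.length ≤ m →
      pySliceA f xs step = sliceG xs step := by
  intro m
  induction m with
  | zero =>
    intro xs f hf hm
    obtain ⟨f', rfl⟩ : ∃ f', f = f' + 1 := ⟨f - 1, by omega⟩
    unfold sliceG
    simp only [pySliceA]
    apply PySem.List.foldl_congr_mem
    intro acc i hi
    obtain ⟨h1, h2⟩ := (PySem.List.mem_pyRange_one).mp hi
    omega
  | succ m ih =>
    intro xs f hf hm
    obtain ⟨f', rfl⟩ : ∃ f', f = f' + 1 := ⟨f - 1, by omega⟩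
    unfold sliceG
    simp only [pySliceA]
    apply PySem.List.foldl_congr_mem
    intro acc i hi
    obtain ⟨h1, h2⟩ := (PySem.List.mem_pyRange_one).mp hi
    have hi0 : 0 ≤ i := by omega
    have hdrop : PySem.List.slice xs (some i) none = xs.drop i.toNat :=
      PySem.List.slice_from _ hi0
    have hlen : (xs.drop i.toNat).length = xs.length - i.toNat := List.length_drop ..
    have h3 : 1 ≤ i.toNat ∧ i.toNat ≤ xs.length - 1 := by omega
    rw [hdrop, ih _ _ (by omega) (by omega), ih _ _ (by omega) (by omega)]

theorem getD_map_range' (f : Nat → List (List (List Int))) (m t : Nat) (ht : t < m) :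
    (((List.range m).map f).getD t []) = f t := by
  rw [List.getD_eq_getElem?_getD]
  simp [ht]

theorem sliceG_unfold (step : Int) (hs : 1 ≤ step) (xs : List Int) :
    sliceG xs step = (PySem.List.pyRange step ((xs.length : Int) + 1 - step) 1).foldl
      (fun result i =>
        ((sliceG (PySem.List.slice xs (some i) none) step).foldl
          (fun r sl => r ++ [PySem.List.slice xs none (some i) :: sl]) result)
          ++ [[PySem.List.slice xs none (some i), PySem.List.slice xs (some i) none]]) [] := by
  conv_lhs => rw [sliceG]
  simp only [pySliceA]
  apply PySem.List.foldl_congr_mem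
  intro acc i hi
  obtain ⟨h1, h2⟩ := (PySem.List.mem_pyRange_one).mp hi
  have hdrop : PySem.List.slice xs (some i) none = xs.drop i.toNat :=
    PySem.List.slice_from _ (by omega)
  have hld : (xs.drop i.toNat).length = xs.length - i.toNat := List.length_drop ..
  rw [hdrop, sliceA_fuel step hs xs.length _ _ (by omega) (by omega)]

theorem memo_inv (indices : List Int) (step : Int) (hs : 1 ≤ step) :
    ∀ m : Nat, m ≤ indices.length →
      ((PySem.List.pyRange 1 ((m : Int) + 1) 1).foldl
        (fun memo k =>
          let base := (indices.length : Int) - k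
          let res := (PySem.List.pyRange step (k + 1 - step)).foldl
            (fun res i =>
              let start := PySem.List.slice indices (some base) (some (base + i))
              let endl  := PySem.List.slice indices (some (base + i)) none
              ((memo.getD (k - i).toNat []).foldl (fun r sl => r ++ [start :: sl]) res)
                ++ [[start, endl]])
            ([] : List (List (List Int)))
          memo ++ [res])
        [([] : List (List (List Int)))])
      = (List.range (m + 1)).map (fun t => sliceG (indices.drop (indices.length - t)) step) := by
  intro m
  induction m with
  | zero =>
    intro hm
    rw [PySem.List.pyRange_one_eq_nil (by norm_num)]
    have h0 : sliceG ([] : List Int) step = [] := by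
      unfold sliceG
      simp only [pySliceA, List.length_nil]
      rw [PySem.List.pyRange_one_eq_nil (by push_cast; omega)]
      rfl
    simp [List.range_succ, h0]
  | succ m ih =>
    intro hm
    have hcast : ((m + 1 : Nat) : Int) + 1 = ((m : Int) + 1) + 1 := by push_cast; ring
    rw [hcast, PySem.List.pyRange_one_succ_right (by omega), List.foldl_append,
        ih (by omega), List.foldl_cons, List.foldl_nil]
    rw [List.range_succ (n := m + 1), List.map_append]
    rw [List.map_singleton, List.append_right_inj, List.singleton_inj]
    set n := indices.length with hn
    have hsuflen : (indices.drop (n - (m + 1))).length = m + 1 := by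
      rw [List.length_drop]; omega
    rw [sliceG_unfold step hs, hsuflen]
    have hb : ((m + 1 : Nat) : Int) + 1 - step = ((m : Int) + 1) + 1 - step := by push_cast; ring
    rw [hb]
    apply PySem.List.foldl_congr_mem
    intro acc i hi
    obtain ⟨h1, h2⟩ := (PySem.List.mem_pyRange_one).mp hi
    -- LHS slices of the full list = the corresponding take/drop of the suffix
    have hstart : PySem.List.slice indices (some ((n : Int) - ((m : Int) + 1)))
          (some ((n : Int) - ((m : Int) + 1) + i))
        = (indices.drop (n - (m + 1))).take i.toNat := by
      have ha : (((n : Int) - ((m : Int) + 1))).toNat = n - (m + 1) := by omega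
      have hb2 : (((n : Int) - ((m : Int) + 1) + i)).toNat - (n - (m + 1)) = i.toNat := by omega
      rw [PySem.List.slice_toNat _ (by omega) (by omega), ha, hb2]
    have hend : PySem.List.slice indices (some ((n : Int) - ((m : Int) + 1) + i)) none
        = (indices.drop (n - (m + 1))).drop i.toNat := by
      have ha : (((n : Int) - ((m : Int) + 1) + i)).toNat = i.toNat + (n - (m + 1)) := by omega
      rw [PySem.List.slice_from _ (by omega), ha, List.drop_drop]
      congr 1
      omega
    have hstart' : PySem.List.slice (indices.drop (n - (m + 1))) none (some i)
        = (indices.drop (n - (m + 1))).take i.toNat := PySem.List.slice_to _ (by omega)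
    have hdropi : PySem.List.slice (indices.drop (n - (m + 1))) (some i) none
        = (indices.drop (n - (m + 1))).drop i.toNat := PySem.List.slice_from _ (by omega)
    have htn : (((m : Int) + 1) - i).toNat = (m + 1) - i.toNat := by omega
    have ht : (m + 1) - i.toNat < m + 1 := by omega
    rw [hstart, hend, hstart', hdropi, htn, getD_map_range' _ _ _ ht]
    have hdd : indices.drop (n - ((m + 1) - i.toNat)) = (indices.drop (n - (m + 1))).drop i.toNat := by
      rw [List.drop_drop]
      congr 1
      omega
    rw [hdd]

-- ===== VERDICT (by name: the statement is the Claim_ definition above) =====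
theorem slice_index_generator_spec : Claim_equal_slice_index_generator := by
  intro indices step _ hpre
  unfold Spec_slice_index_generator slice_index_generator slice_index_generator_alt
  dsimp only
  rw [memo_inv indices step hpre indices.length le_rfl,
      getD_map_range' _ _ _ (Nat.lt_succ_self _)]
  simp [sliceG]
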